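-- pv_equiv track=rewrite | github.com/RayhanRizqi/chess-AI | src/Core/Move_Generation/Magics/magicHelper.py | create_all_blocker_bitboards
-- ===== SOURCE A (Python) =====
-- def create_all_blocker_bitboards(movement_mask):
--     """
--     Create all possible blocker bitboards for a given movement mask
--     """
--     # Create a list of the indices of the bits that are set in the movement mask
--     move_square_indices = []
--     for i in range(64):
--         if (movement_mask >> i) & 1 == 1:
--             move_square_indices.append(i)
--
--     # Calculate total number of different bitboards (one for each possible arrangement of pieces)
--     num_patterns = 1 << len(move_square_indices) # 2^n
--     blocker_bitboards = [0] * num_patterns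
--
--     # Create all bitboards
--     for pattern_index in range(num_patterns):
--         for bit_index, square_index in enumerate(move_square_indices):
--             bit = (pattern_index >> bit_index) & 1
--             blocker_bitboards[pattern_index] |= bit << square_index
--
--     return blocker_bitboards
-- ===== SOURCE B (Python) =====
-- def create_all_blocker_bitboards(movement_mask):
--     """
--     Create all possible blocker bitboards for a given movement mask
--     (subset-doubling: extend the board list once per set bit of the mask)
--     """
--     boards = [0]
--     for i in range(64):
--         if (movement_mask >> i) & 1:
--             bit = 1 << i
--             boards = boards + [board | bit for board in boards]
--     return boards
-- ===== Notes on version B (the rewrite author's own statement) =====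
-- stated objective: faster
-- what changed: Instead of assembling each of the 2^n blocker patterns with an inner loop over all n mask bits, B builds the list by subset doubling: for each set bit of the mask it appends a copy of the current list with that bit OR-ed in, producing the patterns in the same order.
import Mathlib
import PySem

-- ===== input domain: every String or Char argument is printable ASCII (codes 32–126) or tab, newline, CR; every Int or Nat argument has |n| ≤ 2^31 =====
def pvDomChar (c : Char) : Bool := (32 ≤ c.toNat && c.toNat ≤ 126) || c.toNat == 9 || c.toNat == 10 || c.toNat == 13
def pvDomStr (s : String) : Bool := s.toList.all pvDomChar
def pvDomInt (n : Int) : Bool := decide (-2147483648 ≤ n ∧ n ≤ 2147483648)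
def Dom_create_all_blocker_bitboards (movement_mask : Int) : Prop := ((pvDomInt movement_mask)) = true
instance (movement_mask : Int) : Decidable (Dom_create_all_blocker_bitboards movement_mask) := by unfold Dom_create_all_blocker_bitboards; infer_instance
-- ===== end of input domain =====

-- B replaces A's per-pattern inner bit-assembly loop with subset doubling (one list extension per set
-- mask bit), an asymptotically faster construction of the same list in the same order.


-- ===== PORT A =====
-- every shift amount comes from range(64) or enumerate, hence is nonnegative: .toNat is exact there
def create_all_blocker_bitboards (movement_mask : Int) : List Int :=
  let move_square_indices : List Int :=
    (PySem.List.pyRange 0 64).foldl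
      (fun acc i => if PySem.Int.band (movement_mask >>> i.toNat) 1 == 1 then acc ++ [i] else acc) []
  let num_patterns : Int := (1 : Int) <<< move_square_indices.length
  (PySem.List.pyRange 0 num_patterns).map (fun pattern_index =>
    (PySem.List.enumerate move_square_indices 0).foldl
      (fun acc x =>
        PySem.Int.bor acc ((PySem.Int.band (pattern_index >>> x.1.toNat) 1) <<< x.2.toNat)) 0)

-- ===== PORT B =====
def create_all_blocker_bitboards_alt (movement_mask : Int) : List Int :=
  (PySem.List.pyRange 0 64).foldl
    (fun boards i =>
      if PySem.Int.band (movement_mask >>> i.toNat) 1 != 0 then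
        boards ++ boards.map (fun board => PySem.Int.bor board ((1 : Int) <<< i.toNat))
      else boards) [0]

-- ===== PRECONDITION & SPEC =====
-- Pre_ excludes negative masks: Python's sign extension makes every high bit of the mask set, so A
-- attempts to allocate a list with billions of entries and raises MemoryError (B exhausts memory too).
def Pre_create_all_blocker_bitboards (movement_mask : Int) : Prop := 0 ≤ movement_mask
instance (movement_mask : Int) : Decidable (Pre_create_all_blocker_bitboards movement_mask) := by unfold Pre_create_all_blocker_bitboards; infer_instance
def pvWitness_create_all_blocker_bitboards : Int := 5
def Spec_create_all_blocker_bitboards (movement_mask : Int) (out : List Int) : Prop := out = create_all_blocker_bitboards_alt movement_mask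
instance (movement_mask : Int) (out : List Int) : Decidable (Spec_create_all_blocker_bitboards movement_mask out) := by unfold Spec_create_all_blocker_bitboards; infer_instance

-- ===== CLAIM (what is proved, stated in full; the proofs are below) =====
def Claim_equal_create_all_blocker_bitboards : Prop := ∀ (movement_mask : Int), Dom_create_all_blocker_bitboards movement_mask → Pre_create_all_blocker_bitboards movement_mask → Spec_create_all_blocker_bitboards movement_mask (create_all_blocker_bitboards movement_mask)

-- ===== LEMMAS AND PROOFS =====

-- A's per-pattern inner loop, over an arbitrary index list
def pvPatA (xs : List Int) (p : Int) : Int :=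
  (PySem.List.enumerate xs 0).foldl
    (fun acc x => PySem.Int.bor acc ((PySem.Int.band (p >>> x.1.toNat) 1) <<< x.2.toNat)) 0

-- B's doubling step
def pvDbl (boards : List Int) (i : Int) : List Int :=
  boards ++ boards.map (fun board => PySem.Int.bor board ((1 : Int) <<< ((i.toNat : Nat) : Int)))

theorem pv_band_one_cases (x : Int) :
    PySem.Int.band x 1 = 0 ∨ PySem.Int.band x 1 = 1 := by
  rw [PySem.Int.band_one]
  have h : PySem.Int.mod x 2 = x % 2 := by simp [pysem]
  rw [h]; omega

theorem pv_cond_eq (m i : Int) :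
    ((PySem.Int.band (m >>> ((i.toNat : Nat) : Int)) 1 == 1) : Bool)
      = ((PySem.Int.band (m >>> ((i.toNat : Nat) : Int)) 1 != 0) : Bool) := by
  rcases pv_band_one_cases (m >>> ((i.toNat : Nat) : Int)) with h | h <;> rw [h] <;> decide

-- Nat bit facts
theorem pv_nat_high_bit (k q : Nat) (hq : q < 2 ^ k) : (2 ^ k + q) >>> k &&& 1 = 1 := by
  have : (2 ^ k + q) >>> k = 1 := by
    rw [Nat.shiftRight_eq_div_pow, Nat.add_comm, Nat.add_div_right _ (Nat.two_pow_pos k),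
      Nat.div_eq_of_lt hq]
  simp [this]

theorem pv_nat_zero_bit (k q : Nat) (hq : q < 2 ^ k) : q >>> k &&& 1 = 0 := by
  have : q >>> k = 0 := by
    rw [Nat.shiftRight_eq_div_pow, Nat.div_eq_of_lt hq]
  simp [this]

theorem pv_nat_low_bit (k q j : Nat) (hj : j < k) :
    (2 ^ k + q) >>> j &&& 1 = q >>> j &&& 1 := by
  rw [Nat.shiftRight_eq_div_pow, Nat.shiftRight_eq_div_pow, Nat.and_one_is_mod,
    Nat.and_one_is_mod]
  have h1 : 2 ^ k = 2 * 2 ^ (k - j - 1) * 2 ^ j := by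
    rw [show (2 : Nat) * 2 ^ (k - j - 1) = 2 ^ (k - j) from by
        rw [← pow_succ']; congr 1; omega,
      ← pow_add]
    congr 1; omega
  have h2 : (2 ^ k + q) / 2 ^ j = q / 2 ^ j + 2 * 2 ^ (k - j - 1) := by
    rw [h1, Nat.add_comm, Nat.add_mul_div_right _ _ (Nat.two_pow_pos j)]
  rw [h2, Nat.add_mul_mod_self_left]

-- cast bridges
theorem pv_cast_shift (a j : Nat) : ((a : Int) >>> ((j : Nat) : Int)) = ((a >>> j : Nat) : Int) := by
  simp [Int.shiftRight_eq]

theorem pv_band_cast (a : Nat) : PySem.Int.band (a : Int) 1 = ((a &&& 1 : Nat) : Int) := by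
  simpa using PySem.Int.band_natCast a 1

theorem pv_range_two_pow (n : Nat) :
    PySem.List.pyRange 0 ((1 : Int) <<< n)
      = (List.range (2 ^ n)).map (fun (k : Nat) => (k : Int)) := by
  rw [show ((1 : Int) <<< n) = ((2 ^ n : Nat) : Int) from by
      rw [Int.shiftLeft_eq]; push_cast; ring,
    PySem.List.pyRange_zero_natCast]

-- peeling the last enumerated element off A's inner loop
theorem pv_patA_append (xs : List Int) (s p : Int) :
    pvPatA (xs ++ [s]) p
      = PySem.Int.bor (pvPatA xs p)
          ((PySem.Int.band (p >>> ((xs.length : Nat) : Int)) 1) <<< ((s.toNat : Nat) : Int)) := by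
  unfold pvPatA
  rw [PySem.List.enumerate_append, List.foldl_append]
  simp only [PySem.List.enumerate_cons, PySem.List.enumerate_nil, List.foldl_cons,
    List.foldl_nil, zero_add, Int.toNat_natCast]

-- adding 2^len on top of the pattern index does not change A's inner loop over xs
theorem pv_patA_shift (xs : List Int) (q : Nat) :
    pvPatA xs ((2 ^ xs.length + q : Nat) : Int) = pvPatA xs (q : Int) := by
  unfold pvPatA
  apply PySem.List.foldl_congr_mem
  intro acc x hx
  rw [PySem.List.mem_enumerate_iff] at hx
  obtain ⟨j, hj, rfl⟩ := hx
  simp only [zero_add, Int.toNat_natCast]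
  rw [pv_cast_shift, pv_cast_shift, pv_band_cast, pv_band_cast,
    pv_nat_low_bit xs.length q j hj]

theorem pv_patA_low (xs : List Int) (s : Int) (q : Nat) (hq : q < 2 ^ xs.length) :
    pvPatA (xs ++ [s]) (q : Int) = pvPatA xs (q : Int) := by
  rw [pv_patA_append, pv_cast_shift, pv_band_cast, pv_nat_zero_bit xs.length q hq]
  simp [PySem.Int.bor_zero]

theorem pv_patA_high (xs : List Int) (s : Int) (q : Nat) (hq : q < 2 ^ xs.length) :
    pvPatA (xs ++ [s]) ((2 ^ xs.length + q : Nat) : Int)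
      = PySem.Int.bor (pvPatA xs (q : Int)) ((1 : Int) <<< ((s.toNat : Nat) : Int)) := by
  rw [pv_patA_append, pv_patA_shift, pv_cast_shift, pv_band_cast,
    pv_nat_high_bit xs.length q hq]
  norm_num

-- the core equivalence of the two constructions, generic in the index list
theorem pv_main (xs : List Int) :
    (PySem.List.pyRange 0 ((1 : Int) <<< xs.length)).map (pvPatA xs)
      = xs.foldl pvDbl [0] := by
  induction xs using List.reverseRecOn with
  | nil =>
    rw [pv_range_two_pow]
    simp [pvPatA, PySem.List.enumerate_nil]
  | append_singleton xs s ih =>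
    rw [pv_range_two_pow] at ih ⊢
    rw [List.foldl_append]
    rw [show (xs ++ [s]).length = xs.length + 1 from by simp]
    have h2 : 2 ^ (xs.length + 1) = 2 ^ xs.length + 2 ^ xs.length := by
      rw [pow_succ]; omega
    rw [h2, List.range_add, List.map_append, List.map_append, List.map_map, List.map_map,
      List.map_map]
    have hlow : (List.range (2 ^ xs.length)).map (pvPatA (xs ++ [s]) ∘ fun (k : Nat) => (k : Int))
        = (List.range (2 ^ xs.length)).map (pvPatA xs ∘ fun (k : Nat) => (k : Int)) := by
      apply List.map_congr_left
      intro q hq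
      exact pv_patA_low xs s q (List.mem_range.mp hq)
    have hhigh : (List.range (2 ^ xs.length)).map
          ((pvPatA (xs ++ [s]) ∘ fun (k : Nat) => (k : Int)) ∘ fun b => 2 ^ xs.length + b)
        = ((List.range (2 ^ xs.length)).map (pvPatA xs ∘ fun (k : Nat) => (k : Int))).map
            (fun board => PySem.Int.bor board ((1 : Int) <<< ((s.toNat : Nat) : Int))) := by
      rw [List.map_map]
      apply List.map_congr_left
      intro q hq
      exact pv_patA_high xs s q (List.mem_range.mp hq)
    rw [List.map_map] at ih
    rw [hlow, hhigh, ← ih]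
    simp only [List.foldl_cons, List.foldl_nil, pvDbl]

-- ===== VERDICT (by name: the statement is the Claim_ definition above) =====
theorem create_all_blocker_bitboards_spec : Claim_equal_create_all_blocker_bitboards := by
  intro m _ _
  unfold Spec_create_all_blocker_bitboards create_all_blocker_bitboards create_all_blocker_bitboards_alt
  simp only [PySem.List.foldl_if_eq_foldl_filter, PySem.List.foldl_append_singleton_eq_self,
    List.nil_append]
  rw [List.filter_congr (fun i _ => (pv_cond_eq m i).symm)]
  exact pv_main ((PySem.List.pyRange 0 64).filter
    (fun i : Int => PySem.Int.band (m >>> ((i.toNat : Nat) : Int)) 1 == 1))
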